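-- pv_equiv track=rewrite | github.com/JonVogel/ti-scott-adams-esp32 | char_editor.py | hex_to_char
-- ===== SOURCE A (Python) =====
-- GRID = 8
--
-- def hex_to_char(text):
--     text = "".join(ch for ch in text.upper() if ch in "0123456789ABCDEF")
--     text = text[:16].ljust(16, "0")
--     char = [[0] * GRID for _ in range(GRID)]
--     for r in range(GRID):
--         byte = int(text[r * 2:r * 2 + 2], 16)
--         for c in range(GRID):
--             char[r][c] = 1 if byte & (1 << (7 - c)) else 0
--     return char
-- ===== SOURCE B (Python) =====
-- GRID = 8
-- _HEX = "0123456789ABCDEF"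
--
-- def hex_to_char(text):
--     text = "".join(ch for ch in text.upper() if ch in _HEX)
--     text = text[:16].ljust(16, "0")
--     bits = [(_HEX.index(ch) >> k) & 1 for ch in text for k in (3, 2, 1, 0)]
--     return [bits[r * GRID:(r + 1) * GRID] for r in range(GRID)]
-- ===== Notes on version B (the rewrite author's own statement) =====
-- stated objective: alternative
-- what changed: After the identical filter/truncate/pad preamble, B expands each hex digit once into its four MSB-first bits to form one flat 64-bit list and slices it into eight rows, instead of A's per-row int(,16) conversion plus per-cell mask-and-shift testing.
import Mathlib
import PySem

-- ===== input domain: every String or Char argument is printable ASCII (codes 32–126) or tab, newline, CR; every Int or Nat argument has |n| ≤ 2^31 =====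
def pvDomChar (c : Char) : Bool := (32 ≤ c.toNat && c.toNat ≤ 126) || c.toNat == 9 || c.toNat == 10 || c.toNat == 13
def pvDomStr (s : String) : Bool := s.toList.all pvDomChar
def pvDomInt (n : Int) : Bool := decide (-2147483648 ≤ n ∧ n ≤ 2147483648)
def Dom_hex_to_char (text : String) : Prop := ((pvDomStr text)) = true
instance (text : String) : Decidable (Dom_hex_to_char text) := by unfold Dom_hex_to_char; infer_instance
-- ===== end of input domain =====

-- B replaces A's per-row int() + per-bit mask-and-shift with one flat 64-bit list (each hex
-- digit expanded to its 4 MSB-first bits) that is then sliced into eight rows (objective: alternative).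

-- "0123456789ABCDEF"
def pvHexDigits : List Char := ['0','1','2','3','4','5','6','7','8','9','A','B','C','D','E','F']

-- Shared preamble: both Pythons start with the same two lines.
-- `ch in "0123456789ABCDEF"` for a single char is membership in its chars (exact);
-- text[:16].ljust(16,"0"): the take-16 prefix has length ≤ 16, so ljust appends exactly 16 - len zeros (exact).
def pvPrep (text : String) : List Char :=
  let t := (PySem.Str.upper text).toList.filter (fun ch => pvHexDigits.contains ch)
  let t := t.take 16
  t ++ List.replicate (16 - t.length) '0'

-- ===== PORT A =====
-- int(s, 16) → PySem.Int.ofCharsBase? (here s is always two uppercase hex digits, so it is `some`; .getD 0 unreachable).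
-- 1 << (7 - c): 0 ≤ c < 8 so (7 - c).toNat is exact. A preallocates the grid and mutates it
-- row by row / cell by cell; the map over the same ranges is the structural transcription.
def hex_to_char (text : String) : List (List Int) :=
  let t := pvPrep text
  (PySem.List.pyRange 0 8 1).map (fun r =>
    let byte : Int := (PySem.Int.ofCharsBase? (PySem.List.slice t (some (r * 2)) (some (r * 2 + 2))) 16).getD 0
    (PySem.List.pyRange 0 8 1).map (fun c =>
      if PySem.Int.band byte ((1 : Int) <<< (7 - c).toNat) ≠ 0 then (1 : Int) else 0))

-- ===== PORT B =====
-- _HEX.index(ch) → findIdx over the hex digit chars (ch is always present here).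
def pvHexVal (c : Char) : Int := ((pvHexDigits.findIdx (· == c) : Nat) : Int)

def hex_to_char_alt (text : String) : List (List Int) :=
  let t := pvPrep text
  let bits := t.flatMap (fun ch => ([3, 2, 1, 0] : List Nat).map (fun k => PySem.Int.band (pvHexVal ch >>> k) 1))
  (PySem.List.pyRange 0 8 1).map (fun r => PySem.List.slice bits (some (r * 8)) (some ((r + 1) * 8)))

-- ===== PRECONDITION & SPEC =====
def Spec_hex_to_char (text : String) (out : List (List Int)) : Prop := out = hex_to_char_alt text
instance (text : String) (out : List (List Int)) : Decidable (Spec_hex_to_char text out) := by unfold Spec_hex_to_char; infer_instance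

-- ===== CLAIM (what is proved, stated in full; the proofs are below) =====
def Claim_equal_hex_to_char : Prop := ∀ (text : String), Dom_hex_to_char text → Spec_hex_to_char text (hex_to_char text)

-- ===== LEMMAS AND PROOFS =====

lemma pvPrep_length (text : String) : (pvPrep text).length = 16 := by
  simp only [pvPrep, List.length_append, List.length_replicate]
  have := List.length_take_le 16 ((PySem.Str.upper text).toList.filter (fun ch => pvHexDigits.contains ch))
  omega

lemma pvPrep_mem (text : String) : ∀ c ∈ pvPrep text, c ∈ pvHexDigits := by
  intro c hc
  simp only [pvPrep, List.mem_append, List.mem_replicate] at hc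
  rcases hc with hc | hc
  · have := List.mem_of_mem_take hc
    exact List.of_mem_filter (p := fun ch => pvHexDigits.contains ch) this |> List.contains_iff_mem.mp
  · rw [hc.2]; decide

-- one row of A from its two hex chars equals the two 4-bit nibbles B produces for them
lemma pvRow (c0 c1 : Char) (h0 : c0 ∈ pvHexDigits) (h1 : c1 ∈ pvHexDigits) :
    (PySem.List.pyRange 0 8 1).map (fun c =>
        if PySem.Int.band ((PySem.Int.ofCharsBase? [c0, c1] 16).getD 0) ((1 : Int) <<< (7 - c).toNat) ≠ 0 then (1 : Int) else 0)
      = ([3, 2, 1, 0] : List Nat).map (fun k => PySem.Int.band (pvHexVal c0 >>> k) 1)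
        ++ ([3, 2, 1, 0] : List Nat).map (fun k => PySem.Int.band (pvHexVal c1 >>> k) 1) := by
  fin_cases h0 <;> fin_cases h1 <;> decide

lemma pvMain (t : List Char) (hl : t.length = 16) (hm : ∀ c ∈ t, c ∈ pvHexDigits) :
    (PySem.List.pyRange 0 8 1).map (fun r =>
        let byte : Int := (PySem.Int.ofCharsBase? (PySem.List.slice t (some (r * 2)) (some (r * 2 + 2))) 16).getD 0
        (PySem.List.pyRange 0 8 1).map (fun c =>
          if PySem.Int.band byte ((1 : Int) <<< (7 - c).toNat) ≠ 0 then (1 : Int) else 0))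
      = (PySem.List.pyRange 0 8 1).map (fun r =>
          PySem.List.slice (t.flatMap (fun ch => ([3, 2, 1, 0] : List Nat).map (fun k => PySem.Int.band (pvHexVal ch >>> k) 1)))
            (some (r * 8)) (some ((r + 1) * 8))) := by
  obtain ⟨a0,t,rfl⟩ := t.exists_cons_of_ne_nil (by intro h; subst h; simp at hl)
  obtain ⟨a1,t,rfl⟩ := t.exists_cons_of_ne_nil (by intro h; subst h; simp at hl)
  obtain ⟨a2,t,rfl⟩ := t.exists_cons_of_ne_nil (by intro h; subst h; simp at hl)
  obtain ⟨a3,t,rfl⟩ := t.exists_cons_of_ne_nil (by intro h; subst h; simp at hl)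
  obtain ⟨a4,t,rfl⟩ := t.exists_cons_of_ne_nil (by intro h; subst h; simp at hl)
  obtain ⟨a5,t,rfl⟩ := t.exists_cons_of_ne_nil (by intro h; subst h; simp at hl)
  obtain ⟨a6,t,rfl⟩ := t.exists_cons_of_ne_nil (by intro h; subst h; simp at hl)
  obtain ⟨a7,t,rfl⟩ := t.exists_cons_of_ne_nil (by intro h; subst h; simp at hl)
  obtain ⟨a8,t,rfl⟩ := t.exists_cons_of_ne_nil (by intro h; subst h; simp at hl)
  obtain ⟨a9,t,rfl⟩ := t.exists_cons_of_ne_nil (by intro h; subst h; simp at hl)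
  obtain ⟨a10,t,rfl⟩ := t.exists_cons_of_ne_nil (by intro h; subst h; simp at hl)
  obtain ⟨a11,t,rfl⟩ := t.exists_cons_of_ne_nil (by intro h; subst h; simp at hl)
  obtain ⟨a12,t,rfl⟩ := t.exists_cons_of_ne_nil (by intro h; subst h; simp at hl)
  obtain ⟨a13,t,rfl⟩ := t.exists_cons_of_ne_nil (by intro h; subst h; simp at hl)
  obtain ⟨a14,t,rfl⟩ := t.exists_cons_of_ne_nil (by intro h; subst h; simp at hl)
  obtain ⟨a15,t,rfl⟩ := t.exists_cons_of_ne_nil (by intro h; subst h; simp at hl)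
  obtain rfl : t = [] := by simp only [List.length_cons] at hl; exact List.length_eq_zero_iff.mp (by omega)
  simp only [List.mem_cons, List.not_mem_nil, or_false, forall_eq_or_imp, forall_eq] at hm
  obtain ⟨h0,h1,h2,h3,h4,h5,h6,h7,h8,h9,h10,h11,h12,h13,h14,h15⟩ := hm
  have e8 : PySem.List.pyRange 0 8 1 = [0,1,2,3,4,5,6,7] := by decide
  rw [e8]
  simp only [List.map_cons, List.map_nil, List.cons.injEq]
  refine ⟨?_, ?_, ?_, ?_, ?_, ?_, ?_, ?_, trivial⟩
  · rw [show PySem.List.slice [a0,a1,a2,a3,a4,a5,a6,a7,a8,a9,a10,a11,a12,a13,a14,a15] (some ((0:Int) * 2)) (some ((0:Int) * 2 + 2)) = [a0, a1] from by norm_num [PySem.List.slice, PySem.List.clampIdx, show Int.toNat 0 = 0 from rfl, show Int.toNat 2 = 2 from rfl, show Int.toNat 4 = 4 from rfl, show Int.toNat 6 = 6 from rfl, show Int.toNat 8 = 8 from rfl, show Int.toNat 10 = 10 from rfl, show Int.toNat 12 = 12 from rfl, show Int.toNat 14 = 14 from rfl, show Int.toNat 16 = 16 from rfl, show Int.toNat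 24 = 24 from rfl, show Int.toNat 32 = 32 from rfl, show Int.toNat 40 = 40 from rfl, show Int.toNat 48 = 48 from rfl, show Int.toNat 56 = 56 from rfl, show Int.toNat 64 = 64 from rfl],
        show PySem.List.slice (List.flatMap (fun ch => ([3, 2, 1, 0] : List Nat).map (fun k => PySem.Int.band (pvHexVal ch >>> k) 1)) [a0,a1,a2,a3,a4,a5,a6,a7,a8,a9,a10,a11,a12,a13,a14,a15]) (some ((0:Int) * 8)) (some (((0:Int) + 1) * 8)) = ([3, 2, 1, 0] : List Nat).map (fun k => PySem.Int.band (pvHexVal a0 >>> k) 1) ++ ([3, 2, 1, 0] : List Nat).map (fun k => PySem.Int.band (pvHexVal a1 >>> k) 1) from by norm_num [PySem.List.slice, PySem.List.clampIdx, show Int.toNat 0 = 0 from rfl, show Int.toNat 2 = 2 from rfl, show Int.toNat 4 = 4 from rfl, show Int.toNat 6 = 6 from rfl, show Int.toNat 8 = 8 from rfl, show Int.toNat 10 = 10 from rfl, show Int.toNat 12 = 12 from rfl, show Int.toNat 14 = 14 from rfl, show Int.toNat 16 = 16 from rfl, show Int.toNat 24 = 24 from rfl, show Int.toNat 32 = 32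 from rfl, show Int.toNat 40 = 40 from rfl, show Int.toNat 48 = 48 from rfl, show Int.toNat 56 = 56 from rfl, show Int.toNat 64 = 64 from rfl]]
    exact pvRow a0 a1 h0 h1
  · rw [show PySem.List.slice [a0,a1,a2,a3,a4,a5,a6,a7,a8,a9,a10,a11,a12,a13,a14,a15] (some ((1:Int) * 2)) (some ((1:Int) * 2 + 2)) = [a2, a3] from by norm_num [PySem.List.slice, PySem.List.clampIdx, show Int.toNat 0 = 0 from rfl, show Int.toNat 2 = 2 from rfl, show Int.toNat 4 = 4 from rfl, show Int.toNat 6 = 6 from rfl, show Int.toNat 8 = 8 from rfl, show Int.toNat 10 = 10 from rfl, show Int.toNat 12 = 12 from rfl, show Int.toNat 14 = 14 from rfl, show Int.toNat 16 = 16 from rfl, show Int.toNat 24 = 24 from rfl, show Int.toNat 32 = 32 from rfl, show Int.toNat 40 = 40 from rfl, show Int.toNat 48 = 48 from rfl, show Int.toNat 56 = 56 from rfl, show Int.toNat 64 = 64 from rfl],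
        show PySem.List.slice (List.flatMap (fun ch => ([3, 2, 1, 0] : List Nat).map (fun k => PySem.Int.band (pvHexVal ch >>> k) 1)) [a0,a1,a2,a3,a4,a5,a6,a7,a8,a9,a10,a11,a12,a13,a14,a15]) (some ((1:Int) * 8)) (some (((1:Int) + 1) * 8)) = ([3, 2, 1, 0] : List Nat).map (fun k => PySem.Int.band (pvHexVal a2 >>> k) 1) ++ ([3, 2, 1, 0] : List Nat).map (fun k => PySem.Int.band (pvHexVal a3 >>> k) 1) from by norm_num [PySem.List.slice, PySem.List.clampIdx, show Int.toNat 0 = 0 from rfl, show Int.toNat 2 = 2 from rfl, show Int.toNat 4 = 4 from rfl, show Int.toNat 6 = 6 from rfl, show Int.toNat 8 = 8 from rfl, show Int.toNat 10 = 10 from rfl, show Int.toNat 12 = 12 from rfl, show Int.toNat 14 = 14 from rfl, show Int.toNat 16 = 16 from rfl, show Int.toNat 24 = 24 from rfl, show Int.toNat 32 = 32 from rfl, show Int.toNat 40 = 40 from rfl, show Int.toNat 48 = 48 from rfl, show Int.toNat 56 = 56 from rfl, show Int.toNat 64 = 64 from rfl]]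
    exact pvRow a2 a3 h2 h3
  · rw [show PySem.List.slice [a0,a1,a2,a3,a4,a5,a6,a7,a8,a9,a10,a11,a12,a13,a14,a15] (some ((2:Int) * 2)) (some ((2:Int) * 2 + 2)) = [a4, a5] from by norm_num [PySem.List.slice, PySem.List.clampIdx, show Int.toNat 0 = 0 from rfl, show Int.toNat 2 = 2 from rfl, show Int.toNat 4 = 4 from rfl, show Int.toNat 6 = 6 from rfl, show Int.toNat 8 = 8 from rfl, show Int.toNat 10 = 10 from rfl, show Int.toNat 12 = 12 from rfl, show Int.toNat 14 = 14 from rfl, show Int.toNat 16 = 16 from rfl, show Int.toNat 24 = 24 from rfl, show Int.toNat 32 = 32 from rfl, show Int.toNat 40 = 40 from rfl, show Int.toNat 48 = 48 from rfl, show Int.toNat 56 = 56 from rfl, show Int.toNat 64 = 64 from rfl],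
        show PySem.List.slice (List.flatMap (fun ch => ([3, 2, 1, 0] : List Nat).map (fun k => PySem.Int.band (pvHexVal ch >>> k) 1)) [a0,a1,a2,a3,a4,a5,a6,a7,a8,a9,a10,a11,a12,a13,a14,a15]) (some ((2:Int) * 8)) (some (((2:Int) + 1) * 8)) = ([3, 2, 1, 0] : List Nat).map (fun k => PySem.Int.band (pvHexVal a4 >>> k) 1) ++ ([3, 2, 1, 0] : List Nat).map (fun k => PySem.Int.band (pvHexVal a5 >>> k) 1) from by norm_num [PySem.List.slice, PySem.List.clampIdx, show Int.toNat 0 = 0 from rfl, show Int.toNat 2 = 2 from rfl, show Int.toNat 4 = 4 from rfl, show Int.toNat 6 = 6 from rfl, show Int.toNat 8 = 8 from rfl, show Int.toNat 10 = 10 from rfl, show Int.toNat 12 = 12 from rfl, show Int.toNat 14 = 14 from rfl, show Int.toNat 16 = 16 from rfl, show Int.toNat 24 = 24 from rfl, show Int.toNat 32 = 32 from rfl, show Int.toNat 40 = 40 from rfl, show Int.toNat 48 = 48 from rfl, show Int.toNat 56 = 56 from rfl, show Int.toNat 64 = 64 from rfl]]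
    exact pvRow a4 a5 h4 h5
  · rw [show PySem.List.slice [a0,a1,a2,a3,a4,a5,a6,a7,a8,a9,a10,a11,a12,a13,a14,a15] (some ((3:Int) * 2)) (some ((3:Int) * 2 + 2)) = [a6, a7] from by norm_num [PySem.List.slice, PySem.List.clampIdx, show Int.toNat 0 = 0 from rfl, show Int.toNat 2 = 2 from rfl, show Int.toNat 4 = 4 from rfl, show Int.toNat 6 = 6 from rfl, show Int.toNat 8 = 8 from rfl, show Int.toNat 10 = 10 from rfl, show Int.toNat 12 = 12 from rfl, show Int.toNat 14 = 14 from rfl, show Int.toNat 16 = 16 from rfl, show Int.toNat 24 = 24 from rfl, show Int.toNat 32 = 32 from rfl, show Int.toNat 40 = 40 from rfl, show Int.toNat 48 = 48 from rfl, show Int.toNat 56 = 56 from rfl, show Int.toNat 64 = 64 from rfl],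
        show PySem.List.slice (List.flatMap (fun ch => ([3, 2, 1, 0] : List Nat).map (fun k => PySem.Int.band (pvHexVal ch >>> k) 1)) [a0,a1,a2,a3,a4,a5,a6,a7,a8,a9,a10,a11,a12,a13,a14,a15]) (some ((3:Int) * 8)) (some (((3:Int) + 1) * 8)) = ([3, 2, 1, 0] : List Nat).map (fun k => PySem.Int.band (pvHexVal a6 >>> k) 1) ++ ([3, 2, 1, 0] : List Nat).map (fun k => PySem.Int.band (pvHexVal a7 >>> k) 1) from by norm_num [PySem.List.slice, PySem.List.clampIdx, show Int.toNat 0 = 0 from rfl, show Int.toNat 2 = 2 from rfl, show Int.toNat 4 = 4 from rfl, show Int.toNat 6 = 6 from rfl, show Int.toNat 8 = 8 from rfl, show Int.toNat 10 = 10 from rfl, show Int.toNat 12 = 12 from rfl, show Int.toNat 14 = 14 from rfl, show Int.toNat 16 = 16 from rfl, show Int.toNat 24 = 24 from rfl, show Int.toNat 32 = 32 from rfl, show Int.toNat 40 = 40 from rfl, show Int.toNat 48 = 48 from rfl, show Int.toNat 56 = 56 from rfl, show Int.toNat 64 = 64 from rfl]]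
    exact pvRow a6 a7 h6 h7
  · rw [show PySem.List.slice [a0,a1,a2,a3,a4,a5,a6,a7,a8,a9,a10,a11,a12,a13,a14,a15] (some ((4:Int) * 2)) (some ((4:Int) * 2 + 2)) = [a8, a9] from by norm_num [PySem.List.slice, PySem.List.clampIdx, show Int.toNat 0 = 0 from rfl, show Int.toNat 2 = 2 from rfl, show Int.toNat 4 = 4 from rfl, show Int.toNat 6 = 6 from rfl, show Int.toNat 8 = 8 from rfl, show Int.toNat 10 = 10 from rfl, show Int.toNat 12 = 12 from rfl, show Int.toNat 14 = 14 from rfl, show Int.toNat 16 = 16 from rfl, show Int.toNat 24 = 24 from rfl, show Int.toNat 32 = 32 from rfl, show Int.toNat 40 = 40 from rfl, show Int.toNat 48 = 48 from rfl, show Int.toNat 56 = 56 from rfl, show Int.toNat 64 = 64 from rfl],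
        show PySem.List.slice (List.flatMap (fun ch => ([3, 2, 1, 0] : List Nat).map (fun k => PySem.Int.band (pvHexVal ch >>> k) 1)) [a0,a1,a2,a3,a4,a5,a6,a7,a8,a9,a10,a11,a12,a13,a14,a15]) (some ((4:Int) * 8)) (some (((4:Int) + 1) * 8)) = ([3, 2, 1, 0] : List Nat).map (fun k => PySem.Int.band (pvHexVal a8 >>> k) 1) ++ ([3, 2, 1, 0] : List Nat).map (fun k => PySem.Int.band (pvHexVal a9 >>> k) 1) from by norm_num [PySem.List.slice, PySem.List.clampIdx, show Int.toNat 0 = 0 from rfl, show Int.toNat 2 = 2 from rfl, show Int.toNat 4 = 4 from rfl, show Int.toNat 6 = 6 from rfl, show Int.toNat 8 = 8 from rfl, show Int.toNat 10 = 10 from rfl, show Int.toNat 12 = 12 from rfl, show Int.toNat 14 = 14 from rfl, show Int.toNat 16 = 16 from rfl, show Int.toNat 24 = 24 from rfl, show Int.toNat 32 = 32 from rfl, show Int.toNat 40 = 40 from rfl, show Int.toNat 48 = 48 from rfl, show Int.toNat 56 = 56 from rfl, show Int.toNat 64 = 64 from rfl]]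
    exact pvRow a8 a9 h8 h9
  · rw [show PySem.List.slice [a0,a1,a2,a3,a4,a5,a6,a7,a8,a9,a10,a11,a12,a13,a14,a15] (some ((5:Int) * 2)) (some ((5:Int) * 2 + 2)) = [a10, a11] from by norm_num [PySem.List.slice, PySem.List.clampIdx, show Int.toNat 0 = 0 from rfl, show Int.toNat 2 = 2 from rfl, show Int.toNat 4 = 4 from rfl, show Int.toNat 6 = 6 from rfl, show Int.toNat 8 = 8 from rfl, show Int.toNat 10 = 10 from rfl, show Int.toNat 12 = 12 from rfl, show Int.toNat 14 = 14 from rfl, show Int.toNat 16 = 16 from rfl, show Int.toNat 24 = 24 from rfl, show Int.toNat 32 = 32 from rfl, show Int.toNat 40 = 40 from rfl, show Int.toNat 48 = 48 from rfl, show Int.toNat 56 = 56 from rfl, show Int.toNat 64 = 64 from rfl],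
        show PySem.List.slice (List.flatMap (fun ch => ([3, 2, 1, 0] : List Nat).map (fun k => PySem.Int.band (pvHexVal ch >>> k) 1)) [a0,a1,a2,a3,a4,a5,a6,a7,a8,a9,a10,a11,a12,a13,a14,a15]) (some ((5:Int) * 8)) (some (((5:Int) + 1) * 8)) = ([3, 2, 1, 0] : List Nat).map (fun k => PySem.Int.band (pvHexVal a10 >>> k) 1) ++ ([3, 2, 1, 0] : List Nat).map (fun k => PySem.Int.band (pvHexVal a11 >>> k) 1) from by norm_num [PySem.List.slice, PySem.List.clampIdx, show Int.toNat 0 = 0 from rfl, show Int.toNat 2 = 2 from rfl, show Int.toNat 4 = 4 from rfl, show Int.toNat 6 = 6 from rfl, show Int.toNat 8 = 8 from rfl, show Int.toNat 10 = 10 from rfl, show Int.toNat 12 = 12 from rfl, show Int.toNat 14 = 14 from rfl, show Int.toNat 16 = 16 from rfl, show Int.toNat 24 = 24 from rfl, show Int.toNat 32 = 32 from rfl, show Int.toNat 40 = 40 from rfl, show Int.toNat 48 = 48 from rfl, show Int.toNat 56 = 56 from rfl, show Int.toNat 64 = 64 from rfl]]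
    exact pvRow a10 a11 h10 h11
  · rw [show PySem.List.slice [a0,a1,a2,a3,a4,a5,a6,a7,a8,a9,a10,a11,a12,a13,a14,a15] (some ((6:Int) * 2)) (some ((6:Int) * 2 + 2)) = [a12, a13] from by norm_num [PySem.List.slice, PySem.List.clampIdx, show Int.toNat 0 = 0 from rfl, show Int.toNat 2 = 2 from rfl, show Int.toNat 4 = 4 from rfl, show Int.toNat 6 = 6 from rfl, show Int.toNat 8 = 8 from rfl, show Int.toNat 10 = 10 from rfl, show Int.toNat 12 = 12 from rfl, show Int.toNat 14 = 14 from rfl, show Int.toNat 16 = 16 from rfl, show Int.toNat 24 = 24 from rfl, show Int.toNat 32 = 32 from rfl, show Int.toNat 40 = 40 from rfl, show Int.toNat 48 = 48 from rfl, show Int.toNat 56 = 56 from rfl, show Int.toNat 64 = 64 from rfl],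
        show PySem.List.slice (List.flatMap (fun ch => ([3, 2, 1, 0] : List Nat).map (fun k => PySem.Int.band (pvHexVal ch >>> k) 1)) [a0,a1,a2,a3,a4,a5,a6,a7,a8,a9,a10,a11,a12,a13,a14,a15]) (some ((6:Int) * 8)) (some (((6:Int) + 1) * 8)) = ([3, 2, 1, 0] : List Nat).map (fun k => PySem.Int.band (pvHexVal a12 >>> k) 1) ++ ([3, 2, 1, 0] : List Nat).map (fun k => PySem.Int.band (pvHexVal a13 >>> k) 1) from by norm_num [PySem.List.slice, PySem.List.clampIdx, show Int.toNat 0 = 0 from rfl, show Int.toNat 2 = 2 from rfl, show Int.toNat 4 = 4 from rfl, show Int.toNat 6 = 6 from rfl, show Int.toNat 8 = 8 from rfl, show Int.toNat 10 = 10 from rfl, show Int.toNat 12 = 12 from rfl, show Int.toNat 14 = 14 from rfl, show Int.toNat 16 = 16 from rfl, show Int.toNat 24 = 24 from rfl, show Int.toNat 32 = 32 from rfl, show Int.toNat 40 = 40 from rfl, show Int.toNat 48 = 48 from rfl, show Int.toNat 56 = 56 from rfl, show Int.toNat 64 = 64 from rfl]]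
    exact pvRow a12 a13 h12 h13
  · rw [show PySem.List.slice [a0,a1,a2,a3,a4,a5,a6,a7,a8,a9,a10,a11,a12,a13,a14,a15] (some ((7:Int) * 2)) (some ((7:Int) * 2 + 2)) = [a14, a15] from by norm_num [PySem.List.slice, PySem.List.clampIdx, show Int.toNat 0 = 0 from rfl, show Int.toNat 2 = 2 from rfl, show Int.toNat 4 = 4 from rfl, show Int.toNat 6 = 6 from rfl, show Int.toNat 8 = 8 from rfl, show Int.toNat 10 = 10 from rfl, show Int.toNat 12 = 12 from rfl, show Int.toNat 14 = 14 from rfl, show Int.toNat 16 = 16 from rfl, show Int.toNat 24 = 24 from rfl, show Int.toNat 32 = 32 from rfl, show Int.toNat 40 = 40 from rfl, show Int.toNat 48 = 48 from rfl, show Int.toNat 56 = 56 from rfl, show Int.toNat 64 = 64 from rfl],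
        show PySem.List.slice (List.flatMap (fun ch => ([3, 2, 1, 0] : List Nat).map (fun k => PySem.Int.band (pvHexVal ch >>> k) 1)) [a0,a1,a2,a3,a4,a5,a6,a7,a8,a9,a10,a11,a12,a13,a14,a15]) (some ((7:Int) * 8)) (some (((7:Int) + 1) * 8)) = ([3, 2, 1, 0] : List Nat).map (fun k => PySem.Int.band (pvHexVal a14 >>> k) 1) ++ ([3, 2, 1, 0] : List Nat).map (fun k => PySem.Int.band (pvHexVal a15 >>> k) 1) from by norm_num [PySem.List.slice, PySem.List.clampIdx, show Int.toNat 0 = 0 from rfl, show Int.toNat 2 = 2 from rfl, show Int.toNat 4 = 4 from rfl, show Int.toNat 6 = 6 from rfl, show Int.toNat 8 = 8 from rfl, show Int.toNat 10 = 10 from rfl, show Int.toNat 12 = 12 from rfl, show Int.toNat 14 = 14 from rfl, show Int.toNat 16 = 16 from rfl, show Int.toNat 24 = 24 from rfl, show Int.toNat 32 = 32 from rfl, show Int.toNat 40 = 40 from rfl, show Int.toNat 48 = 48 from rfl, show Int.toNat 56 = 56 from rfl, show Int.toNat 64 = 64 from rfl]]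
    exact pvRow a14 a15 h14 h15

theorem pv_spec_aux (text : String) : hex_to_char text = hex_to_char_alt text := by
  simpa only [hex_to_char, hex_to_char_alt] using
    pvMain (pvPrep text) (pvPrep_length text) (pvPrep_mem text)

-- ===== VERDICT (by name: the statement is the Claim_ definition above) =====
theorem hex_to_char_spec : Claim_equal_hex_to_char := by
  intro text _
  unfold Spec_hex_to_char
  exact pv_spec_aux text
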